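-- pv_equiv track=rewrite | github.com/gafisk/strukturdata | 01. Kuliah/Uas/Sequensialganjil.py | OrderedSeqSearch
-- ===== SOURCE A (Python) =====
-- def OrderedSeqSearch(data,key):
--     i = 0
--     stop = False
--     found  = []
--     while not stop and i<len(data):
--
--         if data[i] == key:
--             found.append(i)
--         elif data[i] > key:
--             stop = True
--         i += 1
--     if found != []:
--         return f"{key} di indeks : {found}, iterasi ke: {i}"
--     else:
--         return f"{key} tidak ditemukan, iterasi ke: {i}"
-- ===== SOURCE B (Python) =====
-- def OrderedSeqSearch(data, key):
--     p = next((j for j, x in enumerate(data) if x > key), None)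
--     n = len(data)
--     i = n if p is None else p + 1
--     bound = n if p is None else p
--     found = [j for j in range(bound) if data[j] == key]
--     if found:
--         return f"{key} di indeks : {found}, iterasi ke: {i}"
--     return f"{key} tidak ditemukan, iterasi ke: {i}"
-- ===== Notes on version B (the rewrite author's own statement) =====
-- stated objective: alternative
-- what changed: Replaced A's single interleaved while-loop (stop flag + match collection + iteration counter in one pass) by a find-the-boundary scan (first element > key) followed by a separate comprehension collecting the match indices before that boundary.
import Mathlib
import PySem

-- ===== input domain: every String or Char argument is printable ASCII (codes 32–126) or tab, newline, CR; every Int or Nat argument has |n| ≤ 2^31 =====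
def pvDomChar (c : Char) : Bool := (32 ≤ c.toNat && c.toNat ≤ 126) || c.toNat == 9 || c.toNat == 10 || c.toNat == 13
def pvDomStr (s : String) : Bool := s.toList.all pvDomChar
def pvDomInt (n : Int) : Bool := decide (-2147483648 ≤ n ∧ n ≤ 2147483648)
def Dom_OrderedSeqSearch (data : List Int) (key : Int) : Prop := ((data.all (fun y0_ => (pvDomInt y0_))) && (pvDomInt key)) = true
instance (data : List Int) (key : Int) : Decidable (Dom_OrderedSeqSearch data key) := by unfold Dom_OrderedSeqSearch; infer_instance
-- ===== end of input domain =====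

-- B replaces A's single interleaved stop-flag loop by a boundary-finding scan followed by a
-- separate collection pass over the prefix before the boundary (same cost, different decomposition).

-- f"{found}" for a Python list of ints: "[a, b, ...]"
def pvFmtIntList (l : List Int) : String :=
  "[" ++ String.intercalate ", " (l.map PySem.Int.toStr) ++ "]"

-- ===== PORT A =====
-- the while loop of A: walks the list keeping (found, i); stops early when data[i] > key
def pvALoop (l : List Int) (key : Int) (i : Int) (found : List Int) : List Int × Int :=
  match l with
  | [] => (found, i)
  | d :: rest =>
    if d = key then pvALoop rest key (i + 1) (found ++ [i])
    else if d > key then (found, i + 1)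
    else pvALoop rest key (i + 1) found

def OrderedSeqSearch (data : List Int) (key : Int) : String :=
  let r := pvALoop data key 0 []
  if r.1 ≠ [] then
    PySem.Int.toStr key ++ " di indeks : " ++ pvFmtIntList r.1 ++ ", iterasi ke: " ++ PySem.Int.toStr r.2
  else
    PySem.Int.toStr key ++ " tidak ditemukan, iterasi ke: " ++ PySem.Int.toStr r.2

-- ===== PORT B =====
-- p = next((j for j, x in enumerate(data) if x > key), None)
def pvFindGt (l : List Int) (key : Int) : Option Nat :=
  match l with
  | [] => none
  | d :: rest => if d > key then some 0 else (pvFindGt rest key).map (· + 1)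

-- [j for j in range(bound) if data[j] == key], written as a scan of the prefix carrying j
def pvEqIdx (l : List Int) (key : Int) (j : Nat) : List Int :=
  match l with
  | [] => []
  | d :: rest => if d = key then (j : Int) :: pvEqIdx rest key (j + 1) else pvEqIdx rest key (j + 1)

def OrderedSeqSearch_alt (data : List Int) (key : Int) : String :=
  let p := pvFindGt data key
  let n := data.length
  let i : Int := match p with | none => (n : Int) | some q => (q : Int) + 1
  let bound : Nat := match p with | none => n | some q => q
  let found := pvEqIdx (data.take bound) key 0
  if found ≠ [] then
    PySem.Int.toStr key ++ " di indeks : " ++ pvFmtIntList found ++ ", iterasi ke: " ++ PySem.Int.toStr i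
  else
    PySem.Int.toStr key ++ " tidak ditemukan, iterasi ke: " ++ PySem.Int.toStr i

-- ===== PRECONDITION & SPEC =====
def Spec_OrderedSeqSearch (data : List Int) (key : Int) (out : String) : Prop := out = OrderedSeqSearch_alt data key
instance (data : List Int) (key : Int) (out : String) : Decidable (Spec_OrderedSeqSearch data key out) := by unfold Spec_OrderedSeqSearch; infer_instance

-- ===== CLAIM (what is proved, stated in full; the proofs are below) =====
def Claim_equal_OrderedSeqSearch : Prop := ∀ (data : List Int) (key : Int), Dom_OrderedSeqSearch data key → Spec_OrderedSeqSearch data key (OrderedSeqSearch data key)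

-- ===== LEMMAS AND PROOFS =====

-- A's loop, started at index j with accumulator `found`, produces B's two pieces:
lemma pvALoop_char (key : Int) :
    ∀ (l : List Int) (j : Nat) (found : List Int),
    pvALoop l key (j : Int) found =
      (found ++ pvEqIdx (l.take (match pvFindGt l key with | none => l.length | some q => q)) key j,
       match pvFindGt l key with | none => ((j + l.length : Nat) : Int) | some q => ((j + q : Nat) : Int) + 1) := by
  intro l
  induction l with
  | nil => intro j found; simp [pvALoop, pvFindGt, pvEqIdx]
  | cons d rest ih =>
    intro j found
    by_cases hd : d = key
    · have hgt : ¬ d > key := by omega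
      have h1 : (j : Int) + 1 = ((j + 1 : Nat) : Int) := by push_cast; ring
      rw [pvALoop, if_pos hd, h1, ih (j + 1) (found ++ [(j : Int)])]
      cases hq : pvFindGt rest key with
      | none =>
        simp [pvFindGt, if_neg hgt, hq, pvEqIdx, if_pos hd]
        ring
      | some q =>
        simp [pvFindGt, if_neg hgt, hq, pvEqIdx, if_pos hd]
        ring
    · by_cases hgt : d > key
      · rw [pvALoop, if_neg hd, if_pos hgt]
        simp [pvFindGt, if_pos hgt, pvEqIdx]
      · have h1 : (j : Int) + 1 = ((j + 1 : Nat) : Int) := by push_cast; ring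
        rw [pvALoop, if_neg hd, if_neg hgt, h1, ih (j + 1) found]
        cases hq : pvFindGt rest key with
        | none =>
          simp [pvFindGt, if_neg hgt, hq, pvEqIdx, if_neg hd]
          push_cast; ring
        | some q =>
          simp [pvFindGt, if_neg hgt, hq, pvEqIdx, if_neg hd]
          push_cast; ring

-- ===== VERDICT (by name: the statement is the Claim_ definition above) =====
theorem OrderedSeqSearch_spec : Claim_equal_OrderedSeqSearch := by
  intro data key _
  unfold Spec_OrderedSeqSearch OrderedSeqSearch OrderedSeqSearch_alt
  have h := pvALoop_char key data 0 []
  simp only [Nat.cast_zero] at h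
  rw [h]
  cases hq : pvFindGt data key with
  | none => simp
  | some q => simp [hq]
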